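-- pv_equiv track=rewrite | github.com/Alex-Jando/AdventOfCode2024 | Day13/part1.py | valid_combinations
-- ===== SOURCE A (Python) =====
-- def valid_combinations(a, b, prize):
--     a_x_max = prize[0] // a[0]
--     a_y_max = prize[1] // a[1]
--     b_x_max = prize[0] // b[0]
--     b_y_max = prize[1] // b[1]
--     a_max = min(a_x_max, a_y_max)
--     b_max = min(b_x_max, b_y_max)
--     valid_combinations = []
--     for i in range(min(a_max, 100) + 1):
--         for j in range(min(b_max, 100) + 1):
--             if a[0] * i + b[0] * j == prize[0] and a[1] * i + b[1] * j == prize[1]: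
--                 valid_combinations.append((i, j))
--     return valid_combinations
-- ===== SOURCE B (Python) =====
-- def valid_combinations(a, b, prize):
--     top = min(prize[0] // a[0], prize[1] // a[1], 100)
--     cap = min(prize[0] // b[0], prize[1] // b[1], 100)
--
--     def solve(i):
--         j, r = divmod(prize[0] - a[0] * i, b[0])
--         if r == 0 and 0 <= j <= cap and a[1] * i + b[1] * j == prize[1]:
--             return (i, j)
--         return None
--
--     return [p for p in map(solve, range(top + 1)) if p is not None]
-- ===== Notes on version B (the rewrite author's own statement) =====
-- stated objective: alternative
-- what changed: B removes A's inner 0..min(b_max,100) scan: for each i it solves the x-equation for the unique candidate j with divmod (divisibility + range check), verifies the y-equation, and collects the hits with filter-map over the i range instead of a nested accumulator loop.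
import Mathlib
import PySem

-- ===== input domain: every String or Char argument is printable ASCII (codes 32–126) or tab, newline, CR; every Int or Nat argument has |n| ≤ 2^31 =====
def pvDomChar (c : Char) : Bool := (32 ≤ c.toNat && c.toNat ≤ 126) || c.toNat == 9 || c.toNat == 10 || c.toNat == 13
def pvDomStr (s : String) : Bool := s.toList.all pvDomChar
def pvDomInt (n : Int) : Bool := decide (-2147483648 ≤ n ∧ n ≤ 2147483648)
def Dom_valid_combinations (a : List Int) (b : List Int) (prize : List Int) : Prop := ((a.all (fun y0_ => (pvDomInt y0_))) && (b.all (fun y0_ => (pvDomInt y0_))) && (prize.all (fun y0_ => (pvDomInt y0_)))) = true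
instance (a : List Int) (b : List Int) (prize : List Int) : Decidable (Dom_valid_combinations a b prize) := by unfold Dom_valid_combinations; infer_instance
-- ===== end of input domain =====

-- B replaces A's inner scan over j by solving the x-equation for the unique candidate j (divmod) and
-- collecting hits with a filter-map over the i range instead of a nested accumulator loop; objective: alternative.

-- ===== PORT A =====
def valid_combinations (a : List Int) (b : List Int) (prize : List Int) : List (Int × Int) :=
  let a_x_max := PySem.Int.floordiv (PySem.List.pyGetD prize 0 0) (PySem.List.pyGetD a 0 0)
  let a_y_max := PySem.Int.floordiv (PySem.List.pyGetD prize 1 0) (PySem.List.pyGetD a 1 0)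
  let b_x_max := PySem.Int.floordiv (PySem.List.pyGetD prize 0 0) (PySem.List.pyGetD b 0 0)
  let b_y_max := PySem.Int.floordiv (PySem.List.pyGetD prize 1 0) (PySem.List.pyGetD b 1 0)
  let a_max := min a_x_max a_y_max
  let b_max := min b_x_max b_y_max
  (PySem.List.pyRange 0 (min a_max 100 + 1) 1).foldl (fun acc i =>
    (PySem.List.pyRange 0 (min b_max 100 + 1) 1).foldl (fun acc2 j =>
      if PySem.List.pyGetD a 0 0 * i + PySem.List.pyGetD b 0 0 * j == PySem.List.pyGetD prize 0 0
         && PySem.List.pyGetD a 1 0 * i + PySem.List.pyGetD b 1 0 * j == PySem.List.pyGetD prize 1 0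
      then acc2 ++ [(i, j)] else acc2) acc) []

-- ===== PORT B =====
-- Source B's inner `solve(i)`; `divmod(rem, b0)` is ported as (floordiv, mod), exact Python semantics for b0 ≠ 0.
def vcSolve (a0 a1 b0 b1 p0 p1 cap : Int) (i : Int) : Option (Int × Int) :=
  let j := PySem.Int.floordiv (p0 - a0 * i) b0
  let r := PySem.Int.mod (p0 - a0 * i) b0
  if r == 0 && decide (0 ≤ j) && decide (j ≤ cap) && (a1 * i + b1 * j == p1)
  then some (i, j) else none

def valid_combinations_alt (a : List Int) (b : List Int) (prize : List Int) : List (Int × Int) :=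
  let top := min (min (PySem.Int.floordiv (PySem.List.pyGetD prize 0 0) (PySem.List.pyGetD a 0 0))
                      (PySem.Int.floordiv (PySem.List.pyGetD prize 1 0) (PySem.List.pyGetD a 1 0))) 100
  let cap := min (min (PySem.Int.floordiv (PySem.List.pyGetD prize 0 0) (PySem.List.pyGetD b 0 0))
                      (PySem.Int.floordiv (PySem.List.pyGetD prize 1 0) (PySem.List.pyGetD b 1 0))) 100
  (PySem.List.pyRange 0 (top + 1) 1).filterMap
    (vcSolve (PySem.List.pyGetD a 0 0) (PySem.List.pyGetD a 1 0)
             (PySem.List.pyGetD b 0 0) (PySem.List.pyGetD b 1 0)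
             (PySem.List.pyGetD prize 0 0) (PySem.List.pyGetD prize 1 0) cap)

-- ===== PRECONDITION & SPEC =====
-- Pre_ excludes exactly the inputs where Python A raises: lists shorter than 2 (IndexError) or a zero divisor (ZeroDivisionError).
def Pre_valid_combinations (a : List Int) (b : List Int) (prize : List Int) : Prop :=
  2 ≤ a.length ∧ 2 ≤ b.length ∧ 2 ≤ prize.length ∧
  a.getD 0 0 ≠ 0 ∧ a.getD 1 0 ≠ 0 ∧ b.getD 0 0 ≠ 0 ∧ b.getD 1 0 ≠ 0
instance (a : List Int) (b : List Int) (prize : List Int) : Decidable (Pre_valid_combinations a b prize) := by unfold Pre_valid_combinations; infer_instance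
def pvWitness_valid_combinations : List Int × List Int × List Int := ([94, 34], [22, 67], [8400, 5400])

def Spec_valid_combinations (a : List Int) (b : List Int) (prize : List Int) (out : List (Int × Int)) : Prop := out = valid_combinations_alt a b prize
instance (a : List Int) (b : List Int) (prize : List Int) (out : List (Int × Int)) : Decidable (Spec_valid_combinations a b prize out) := by unfold Spec_valid_combinations; infer_instance

-- ===== CLAIM (what is proved, stated in full; the proofs are below) =====
def Claim_equal_valid_combinations : Prop := ∀ (a : List Int) (b : List Int) (prize : List Int), Dom_valid_combinations a b prize → Pre_valid_combinations a b prize → Spec_valid_combinations a b prize (valid_combinations a b prize)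

-- ===== LEMMAS AND PROOFS =====

-- filtering by a predicate with at most one satisfying value out of a duplicate-free list
lemma filter_unique {p : Int → Bool} {c : Int} :
    ∀ (l : List Int), l.Nodup → (∀ x, p x = true → x = c) →
      l.filter p = if c ∈ l ∧ p c = true then [c] else [] := by
  intro l
  induction l with
  | nil => simp
  | cons x l ih =>
    intro hn hu
    rcases List.nodup_cons.mp hn with ⟨hx, hn'⟩
    rw [List.filter_cons, ih hn' hu]
    by_cases hpx : p x = true
    · have hxc : x = c := hu x hpx
      subst hxc
      simp [hpx, hx]
    · simp only [hpx]
      by_cases hpc : p c = true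
      · have hcx : ¬ c = x := fun h => hpx (h ▸ hpc)
        simp [List.mem_cons, hpc, hcx]
      · simp [hpc]

-- A's inner j-scan (as a filter over the j-range) computes exactly B's one-candidate test for this i
lemma inner_eq (a0 a1 b0 b1 p0 p1 bm i : Int) (hb0 : b0 ≠ 0) :
    ((PySem.List.pyRange 0 (bm + 1) 1).filter
        (fun j => a0 * i + b0 * j == p0 && a1 * i + b1 * j == p1)).map (fun j => (i, j))
      = (vcSolve a0 a1 b0 b1 p0 p1 bm i).toList := by
  set r := p0 - a0 * i with hr
  set c := PySem.Int.floordiv r b0 with hc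
  have hmm := PySem.Int.floordiv_mul_add_mod r b0
  have hu : ∀ x, (a0 * i + b0 * x == p0 && a1 * i + b1 * x == p1) = true → x = c := by
    intro x hx
    rw [Bool.and_eq_true, beq_iff_eq, beq_iff_eq] at hx
    have h1 : b0 * x = r := by rw [hr]; linarith [hx.1]
    have hdvd : b0 ∣ r := ⟨x, h1.symm⟩
    have hm0 : PySem.Int.mod r b0 = 0 := (PySem.Int.mod_eq_zero_iff_dvd r b0).mpr hdvd
    have h2 : c * b0 = r := by rw [hm0] at hmm; linarith
    have hxc : x * b0 = c * b0 := by rw [h2, ← h1]; ring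
    exact mul_right_cancel₀ hb0 hxc
  rw [filter_unique _ (PySem.List.nodup_pyRange_one 0 (bm + 1)) hu]
  simp only [vcSolve, ← hr, ← hc]
  by_cases hm : PySem.Int.mod r b0 = 0
  · have h2 : c * b0 = r := by rw [hm] at hmm; linarith
    have hpc : (a0 * i + b0 * c == p0) = true := by
      rw [beq_iff_eq]; rw [hr] at h2; linarith
    by_cases hQ : 0 ≤ c ∧ c ≤ bm ∧ a1 * i + b1 * c = p1
    · rw [if_pos ⟨PySem.List.mem_pyRange_one.mpr ⟨hQ.1, by omega⟩,
                  by rw [Bool.and_eq_true]; exact ⟨hpc, beq_iff_eq.mpr hQ.2.2⟩⟩,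
          if_pos (by simp [hm, hQ.1, hQ.2.1, hQ.2.2])]
      simp
    · rw [if_neg ?hng, if_neg ?hng']
      · simp
      case hng =>
        rintro ⟨hmem, hp⟩
        rcases PySem.List.mem_pyRange_one.mp hmem with ⟨h0, hlt⟩
        rw [Bool.and_eq_true] at hp
        rcases hp with ⟨-, hy⟩
        exact hQ ⟨h0, by omega, beq_iff_eq.mp hy⟩
      case hng' =>
        intro hcond
        simp only [Bool.and_eq_true, beq_iff_eq, decide_eq_true_eq] at hcond
        exact hQ ⟨hcond.1.1.2, hcond.1.2, hcond.2⟩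
  · rw [if_neg ?hng2, if_neg ?hng3]
    · simp
    case hng2 =>
      rintro ⟨-, hp⟩
      rw [Bool.and_eq_true] at hp
      rcases hp with ⟨hx1, -⟩
      have h1 : b0 * c = r := by linarith [beq_iff_eq.mp hx1]
      exact hm ((PySem.Int.mod_eq_zero_iff_dvd r b0).mpr ⟨c, h1.symm⟩)
    case hng3 =>
      intro hcond
      simp only [Bool.and_eq_true, beq_iff_eq, decide_eq_true_eq] at hcond
      exact hm hcond.1.1.1

-- A's nested accumulator loops, over abstract integers, equal B's filterMap over the i range
lemma both_eq (a0 a1 b0 b1 p0 p1 am bm : Int) (hb0 : b0 ≠ 0) :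
    (PySem.List.pyRange 0 (am + 1) 1).foldl (fun acc i =>
      (PySem.List.pyRange 0 (bm + 1) 1).foldl (fun acc2 j =>
        if a0 * i + b0 * j == p0 && a1 * i + b1 * j == p1 then acc2 ++ [(i, j)] else acc2) acc) []
    = (PySem.List.pyRange 0 (am + 1) 1).filterMap (vcSolve a0 a1 b0 b1 p0 p1 bm) := by
  have hA : (fun (acc : List (Int × Int)) (i : Int) =>
      (PySem.List.pyRange 0 (bm + 1) 1).foldl (fun acc2 j =>
        if a0 * i + b0 * j == p0 && a1 * i + b1 * j == p1 then acc2 ++ [(i, j)] else acc2) acc)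
      = (fun acc i => acc ++
          ((PySem.List.pyRange 0 (bm + 1) 1).filter
            (fun j => a0 * i + b0 * j == p0 && a1 * i + b1 * j == p1)).map (fun j => (i, j))) := by
    funext acc i
    exact PySem.List.foldl_append_if _ _ _ _
  rw [hA, PySem.List.foldl_append_eq_flatMap, List.filterMap_eq_flatMap_toList]
  simp only [List.nil_append]
  exact List.flatMap_congr (fun i _ => inner_eq a0 a1 b0 b1 p0 p1 bm i hb0)

-- ===== VERDICT (by name: the statement is the Claim_ definition above) =====
theorem valid_combinations_spec : Claim_equal_valid_combinations := by
  intro a b prize _ hpre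
  obtain ⟨ha, hb, hp, _, _, hb0, _⟩ := hpre
  have hb0' : PySem.List.pyGetD b 0 0 ≠ 0 := by
    rw [PySem.List.pyGetD_ofNat']; exact hb0
  exact both_eq (PySem.List.pyGetD a 0 0) (PySem.List.pyGetD a 1 0)
    (PySem.List.pyGetD b 0 0) (PySem.List.pyGetD b 1 0)
    (PySem.List.pyGetD prize 0 0) (PySem.List.pyGetD prize 1 0)
    (min (min (PySem.Int.floordiv (PySem.List.pyGetD prize 0 0) (PySem.List.pyGetD a 0 0))
              (PySem.Int.floordiv (PySem.List.pyGetD prize 1 0) (PySem.List.pyGetD a 1 0))) 100)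
    (min (min (PySem.Int.floordiv (PySem.List.pyGetD prize 0 0) (PySem.List.pyGetD b 0 0))
              (PySem.Int.floordiv (PySem.List.pyGetD prize 1 0) (PySem.List.pyGetD b 1 0))) 100)
    hb0'
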